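-- pv_equiv track=rewrite | github.com/mdaw323/alg | adventofcode2017/day_3.py | part1
-- ===== SOURCE A (Python) =====
-- directions = [(1, 0), (0, 1), (-1, 0), (0, -1)]
--
-- def part1(ll: int):
--     d = 0
--     direction = directions[d % 4]
--     next_dir = directions[(d+1) % 4]
--
--     rooms = {(0, 0)}
--     x, y = 1, 0
--     for i in range(2, ll + 1):
--         rooms.add((x, y))
--         if ll == i:
--             return abs(x) + abs(y)
--         if (x+next_dir[0], y+next_dir[1]) not in rooms:
--             d += 1
--             direction = directions[d % 4]
--             next_dir = directions[(d+1) % 4]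
--         x, y = x + direction[0], y + direction[1]
--     return 0
-- ===== SOURCE B (Python) =====
-- def part1(ll):
--     if ll < 2:
--         return 0
--     k = 1
--     while (2 * k + 1) ** 2 < ll:
--         k += 1
--     off = (ll - (2 * k - 1) ** 2) % (2 * k)
--     return k + abs(off - k)
-- ===== Notes on version B (the rewrite author's own statement) =====
-- stated objective: faster
-- what changed: Replaced the cell-by-cell spiral walk with a visited-cell set by a direct ring computation: find the ring k with (2k-1)^2 < ll <= (2k+1)^2 and return k + |((ll-(2k-1)^2) mod 2k) - k|.
import Mathlib
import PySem

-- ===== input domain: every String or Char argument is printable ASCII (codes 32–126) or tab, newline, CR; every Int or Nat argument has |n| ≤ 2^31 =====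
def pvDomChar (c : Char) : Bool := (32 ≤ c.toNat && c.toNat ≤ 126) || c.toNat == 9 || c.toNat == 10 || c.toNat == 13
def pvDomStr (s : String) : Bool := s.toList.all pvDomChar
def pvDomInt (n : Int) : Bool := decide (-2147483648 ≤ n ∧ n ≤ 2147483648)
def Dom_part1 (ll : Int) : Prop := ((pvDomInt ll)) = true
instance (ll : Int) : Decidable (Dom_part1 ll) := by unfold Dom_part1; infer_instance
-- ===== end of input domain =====

-- B replaces A's cell-by-cell spiral walk over a visited-cell set by a direct ring/offset computation.

-- ===== PORT A =====
def pvDirections : List (Int × Int) := [(1, 0), (0, 1), (-1, 0), (0, -1)]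

-- the for-loop of A, with its early return; state = (rooms, x, y, d, direction, next_dir);
-- rooms is a Std.HashSet: exact finite-set semantics for Python's set (it is only ever
-- inserted into and queried for membership, never iterated)
def part1Go (ll : Int) : List Int → Std.HashSet (Int × Int) → Int → Int → Int → (Int × Int) → (Int × Int) → Int
  | [], _, _, _, _, _, _ => 0
  | i :: rest, rooms, x, y, d, dir, nextDir =>
    let rooms' := rooms.insert (x, y)
    if ll = i then |x| + |y|
    else if (x + nextDir.1, y + nextDir.2) ∉ rooms' then
      let d' := d + 1
      let dir' := (PySem.List.pyGet? pvDirections (PySem.Int.mod d' 4)).getD (0, 0)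
      let nextDir' := (PySem.List.pyGet? pvDirections (PySem.Int.mod (d' + 1) 4)).getD (0, 0)
      part1Go ll rest rooms' (x + dir'.1) (y + dir'.2) d' dir' nextDir'
    else
      part1Go ll rest rooms' (x + dir.1) (y + dir.2) d dir nextDir

def part1 (ll : Int) : Int :=
  let d : Int := 0
  let dir := (PySem.List.pyGet? pvDirections (PySem.Int.mod d 4)).getD (0, 0)
  let nextDir := (PySem.List.pyGet? pvDirections (PySem.Int.mod (d + 1) 4)).getD (0, 0)
  part1Go ll (PySem.List.pyRange 2 (ll + 1) 1) (Std.HashSet.ofList [((0 : Int), (0 : Int))]) 1 0 d dir nextDir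

-- ===== PORT B =====
-- while (2*k+1)**2 < ll: k += 1   (fuel = ll.toNat only bounds the iteration count;
-- findRing_eq_aux below proves it is never exhausted on the inputs part1_alt uses)
def findRing (fuel : Nat) (ll k : Int) : Int :=
  match fuel with
  | 0 => k
  | f + 1 => if (2 * k + 1) ^ 2 < ll then findRing f ll (k + 1) else k

def part1_alt (ll : Int) : Int :=
  if ll < 2 then 0
  else
    let k := findRing ll.toNat ll 1
    let off := PySem.Int.mod (ll - (2 * k - 1) ^ 2) (2 * k)
    k + |off - k|

-- ===== PRECONDITION & SPEC =====
def Spec_part1 (ll : Int) (out : Int) : Prop := out = part1_alt ll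
instance (ll : Int) (out : Int) : Decidable (Spec_part1 ll out) := by unfold Spec_part1; infer_instance

-- ===== CLAIM (what is proved, stated in full; the proofs are below) =====
def Claim_equal_part1 : Prop := ∀ (ll : Int), Dom_part1 ll → Spec_part1 ll (part1 ll)

-- ===== LEMMAS AND PROOFS =====

-- ring number of a cell
def ringK (a b : Int) : Int := max |a| |b|

-- 1-based spiral index of the cell (a, b)
def sidx (a b : Int) : Int :=
  let k := ringK a b
  if k = 0 then 1
  else if a = k ∧ 1 - k ≤ b then (2 * k - 1) ^ 2 + k + b
  else if b = k then (2 * k - 1) ^ 2 + 3 * k - a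
  else if a = -k then (2 * k - 1) ^ 2 + 5 * k - b
  else (2 * k - 1) ^ 2 + 7 * k + a

-- direction index (d mod 4) held by A's loop when it reaches cell (a, b)
def arr (a b : Int) : Int :=
  let k := ringK a b
  if a = k ∧ 2 - k ≤ b then 1
  else if b = k then 2
  else if a = -k then 3
  else 0

-- direction vector as a function of d mod 4
def dval (r : Int) : Int × Int :=
  if r = 0 then (1, 0) else if r = 1 then (0, 1) else if r = 2 then (-1, 0) else (0, -1)

lemma ringK_nonneg (a b : Int) : 0 ≤ ringK a b := by
  unfold ringK; exact le_trans (abs_nonneg a) (le_max_left _ _)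

lemma ringK_right (k b : Int) (hk : 0 ≤ k) (h1 : -k ≤ b) (h2 : b ≤ k) : ringK k b = k := by
  unfold ringK; rw [abs_of_nonneg hk]; exact max_eq_left (abs_le.mpr ⟨h1, h2⟩)

lemma ringK_top (k a : Int) (hk : 0 ≤ k) (h1 : -k ≤ a) (h2 : a ≤ k) : ringK a k = k := by
  unfold ringK; rw [abs_of_nonneg hk]; exact max_eq_right (abs_le.mpr ⟨h1, h2⟩)

lemma ringK_left (k b : Int) (hk : 0 ≤ k) (h1 : -k ≤ b) (h2 : b ≤ k) : ringK (-k) b = k := by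
  unfold ringK; rw [abs_neg, abs_of_nonneg hk]; exact max_eq_left (abs_le.mpr ⟨h1, h2⟩)

lemma ringK_bottom (k a : Int) (hk : 0 ≤ k) (h1 : -k ≤ a) (h2 : a ≤ k) : ringK a (-k) = k := by
  unfold ringK; rw [abs_neg, abs_of_nonneg hk]; exact max_eq_right (abs_le.mpr ⟨h1, h2⟩)

lemma ringK_zero (a b : Int) (h : ringK a b = 0) : a = 0 ∧ b = 0 := by
  unfold ringK at h
  have h1 : |a| ≤ 0 := h ▸ le_max_left |a| |b|
  have h2 : |b| ≤ 0 := h ▸ le_max_right |a| |b|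
  exact ⟨abs_eq_zero.mp (le_antisymm h1 (abs_nonneg a)),
         abs_eq_zero.mp (le_antisymm h2 (abs_nonneg b))⟩

lemma shape (a b : Int) (hk : 1 ≤ ringK a b) :
    ∃ k : Int, 1 ≤ k ∧ ringK a b = k ∧
      ((a = k ∧ 1 - k ≤ b ∧ b ≤ k) ∨ (b = k ∧ -k ≤ a ∧ a ≤ k - 1) ∨
       (a = -k ∧ -k ≤ b ∧ b ≤ k - 1) ∨ (b = -k ∧ 1 - k ≤ a ∧ a ≤ k)) := by
  refine ⟨ringK a b, hk, rfl, ?_⟩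
  unfold ringK at hk ⊢
  rcases le_total |a| |b| with h | h
  · rw [max_eq_right h] at hk ⊢
    rcases abs_cases a with ⟨h1, h2⟩ | ⟨h1, h2⟩ <;> rcases abs_cases b with ⟨h3, h4⟩ | ⟨h3, h4⟩ <;>
      rw [h1, h3] at h <;> rw [h3] at hk ⊢ <;> omega
  · rw [max_eq_left h] at hk ⊢
    rcases abs_cases a with ⟨h1, h2⟩ | ⟨h1, h2⟩ <;> rcases abs_cases b with ⟨h3, h4⟩ | ⟨h3, h4⟩ <;>
      rw [h1, h3] at h <;> rw [h1] at hk ⊢ <;> omega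

lemma sidx_right (k b : Int) (hk : 1 ≤ k) (h1 : 1 - k ≤ b) (h2 : b ≤ k) :
    sidx k b = (2 * k - 1) ^ 2 + k + b := by
  have hK : ringK k b = k := ringK_right k b (by omega) (by omega) h2
  simp only [sidx]
  rw [hK, if_neg (by omega), if_pos ⟨rfl, h1⟩]

lemma sidx_top (k a : Int) (hk : 1 ≤ k) (h1 : -k ≤ a) (h2 : a ≤ k - 1) :
    sidx a k = (2 * k - 1) ^ 2 + 3 * k - a := by
  have hK : ringK a k = k := ringK_top k a (by omega) h1 (by omega)
  simp only [sidx]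
  rw [hK, if_neg (by omega), if_neg (by rintro ⟨h, -⟩; omega), if_pos rfl]

lemma sidx_left (k b : Int) (hk : 1 ≤ k) (h1 : -k ≤ b) (h2 : b ≤ k - 1) :
    sidx (-k) b = (2 * k - 1) ^ 2 + 5 * k - b := by
  have hK : ringK (-k) b = k := ringK_left k b (by omega) h1 (by omega)
  simp only [sidx]
  rw [hK, if_neg (by omega), if_neg (by rintro ⟨h, -⟩; omega), if_neg (by omega), if_pos rfl]

lemma sidx_bottom (k a : Int) (hk : 1 ≤ k) (h1 : 1 - k ≤ a) (h2 : a ≤ k) :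
    sidx a (-k) = (2 * k - 1) ^ 2 + 7 * k + a := by
  have hK : ringK a (-k) = k := ringK_bottom k a (by omega) (by omega) h2
  simp only [sidx]
  rw [hK, if_neg (by omega), if_neg (by rintro ⟨-, h⟩; omega), if_neg (by omega), if_neg (by omega)]

lemma arr_right (k b : Int) (hk : 1 ≤ k) (h1 : 2 - k ≤ b) (h2 : b ≤ k) : arr k b = 1 := by
  have hK : ringK k b = k := ringK_right k b (by omega) (by omega) h2
  simp only [arr]
  rw [hK, if_pos ⟨rfl, h1⟩]

lemma arr_entry (k b : Int) (hk : 1 ≤ k) (hb : b = 1 - k) : arr k b = 0 := by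
  subst hb
  have hK : ringK k (1 - k) = k := ringK_right k (1 - k) (by omega) (by omega) (by omega)
  simp only [arr]
  rw [hK, if_neg (by rintro ⟨-, h⟩; omega), if_neg (by omega), if_neg (by omega)]

lemma arr_top (k a : Int) (hk : 1 ≤ k) (h1 : -k ≤ a) (h2 : a ≤ k - 1) : arr a k = 2 := by
  have hK : ringK a k = k := ringK_top k a (by omega) h1 (by omega)
  simp only [arr]
  rw [hK, if_neg (by rintro ⟨h, -⟩; omega), if_pos rfl]

lemma arr_left (k b : Int) (hk : 1 ≤ k) (h1 : -k ≤ b) (h2 : b ≤ k - 1) : arr (-k) b = 3 := by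
  have hK : ringK (-k) b = k := ringK_left k b (by omega) h1 (by omega)
  simp only [arr]
  rw [hK, if_neg (by rintro ⟨h, -⟩; omega), if_neg (by omega), if_pos rfl]

lemma arr_bottom (k a : Int) (hk : 1 ≤ k) (h1 : 1 - k ≤ a) (h2 : a ≤ k) : arr a (-k) = 0 := by
  have hK : ringK a (-k) = k := ringK_bottom k a (by omega) (by omega) h2
  simp only [arr]
  rw [hK, if_neg (by rintro ⟨-, h⟩; omega), if_neg (by omega), if_neg (by omega)]

lemma sq_mono (u v : Int) (h0 : 0 ≤ u) (huv : u ≤ v) : u ^ 2 ≤ v ^ 2 := by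
  calc u ^ 2 = u * u := by ring
    _ ≤ v * v := mul_le_mul huv huv h0 (le_trans h0 huv)
    _ = v ^ 2 := by ring

lemma sidx_range' (a b k : Int) (hk : 1 ≤ k) (hkk : ringK a b = k) :
    (2 * k - 1) ^ 2 + 1 ≤ sidx a b ∧ sidx a b ≤ (2 * k - 1) ^ 2 + 8 * k := by
  obtain ⟨k', hk1', hkk', hc⟩ := shape a b (by rw [hkk]; exact hk)
  have hkeq : k' = k := by rw [hkk] at hkk'; omega
  rw [hkeq] at hk1' hc
  rcases hc with ⟨h1, h2, h3⟩ | ⟨h1, h2, h3⟩ | ⟨h1, h2, h3⟩ | ⟨h1, h2, h3⟩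
  · rw [h1, sidx_right k b hk h2 h3]; constructor <;> linarith
  · rw [h1, sidx_top k a hk h2 h3]; constructor <;> linarith
  · rw [h1, sidx_left k b hk h2 h3]; constructor <;> linarith
  · rw [h1, sidx_bottom k a hk h2 h3]; constructor <;> linarith

lemma sidx_of_ringK_zero (a b : Int) (h : ringK a b = 0) : sidx a b = 1 := by
  simp [sidx, h]

lemma sidx_pos (a b : Int) : 1 ≤ sidx a b := by
  by_cases h : ringK a b = 0
  · rw [sidx_of_ringK_zero a b h]
  · have hk1 : 1 ≤ ringK a b := by have := ringK_nonneg a b; omega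
    have hr := sidx_range' a b (ringK a b) hk1 rfl
    nlinarith [sq_nonneg (2 * ringK a b - 1)]

lemma sidx_eq_one (a b : Int) (h : sidx a b = 1) : a = 0 ∧ b = 0 := by
  by_cases hk : ringK a b = 0
  · exact ringK_zero a b hk
  · exfalso
    have hk1 : 1 ≤ ringK a b := by have := ringK_nonneg a b; omega
    have hr := sidx_range' a b (ringK a b) hk1 rfl
    have hsq : 1 ≤ (2 * ringK a b - 1) ^ 2 := by nlinarith
    linarith [hr.1]
lemma sidx_inj (a b c d : Int) (h : sidx a b = sidx c d) : a = c ∧ b = d := by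
  by_cases hA0 : ringK a b = 0
  · obtain ⟨ha, hb⟩ := ringK_zero a b hA0
    have h1 : sidx a b = 1 := sidx_of_ringK_zero a b hA0
    obtain ⟨hc, hd⟩ := sidx_eq_one c d (by omega)
    exact ⟨by omega, by omega⟩
  · by_cases hC0 : ringK c d = 0
    · obtain ⟨hc, hd⟩ := ringK_zero c d hC0
      have h1 : sidx c d = 1 := sidx_of_ringK_zero c d hC0
      obtain ⟨ha, hb⟩ := sidx_eq_one a b (by omega)
      exact ⟨by omega, by omega⟩
    · have hk1 : 1 ≤ ringK a b := by have := ringK_nonneg a b; omega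
      have hk2 : 1 ≤ ringK c d := by have := ringK_nonneg c d; omega
      have r1 := sidx_range' a b (ringK a b) hk1 rfl
      have r2 := sidx_range' c d (ringK c d) hk2 rfl
      rcases lt_trichotomy (ringK a b) (ringK c d) with hlt | heq | hgt
      · exfalso
        have hm : (2 * ringK a b + 1) ^ 2 ≤ (2 * ringK c d - 1) ^ 2 :=
          sq_mono _ _ (by omega) (by omega)
        linarith [r1.2, r2.1]
      · obtain ⟨k, hk1', hkk, hc1⟩ := shape a b hk1
        obtain ⟨k2, hk2', hkk2, hc2⟩ := shape c d hk2
        have hkeq : k2 = k := by rw [← hkk2, ← heq, hkk]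
        rw [hkeq] at hc2
        rcases hc1 with ⟨e1, f1, g1⟩ | ⟨e1, f1, g1⟩ | ⟨e1, f1, g1⟩ | ⟨e1, f1, g1⟩ <;>
          rcases hc2 with ⟨e2, f2, g2⟩ | ⟨e2, f2, g2⟩ | ⟨e2, f2, g2⟩ | ⟨e2, f2, g2⟩ <;>
          rw [e1, e2] at h
        · rw [sidx_right k b hk1' f1 g1, sidx_right k d hk1' f2 g2] at h
          constructor <;> linarith
        · rw [sidx_right k b hk1' f1 g1, sidx_top k c hk1' f2 g2] at h
          constructor <;> linarith
        · rw [sidx_right k b hk1' f1 g1, sidx_left k d hk1' f2 g2] at h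
          constructor <;> linarith
        · rw [sidx_right k b hk1' f1 g1, sidx_bottom k c hk1' f2 g2] at h
          constructor <;> linarith
        · rw [sidx_top k a hk1' f1 g1, sidx_right k d hk1' f2 g2] at h
          constructor <;> linarith
        · rw [sidx_top k a hk1' f1 g1, sidx_top k c hk1' f2 g2] at h
          constructor <;> linarith
        · rw [sidx_top k a hk1' f1 g1, sidx_left k d hk1' f2 g2] at h
          constructor <;> linarith
        · rw [sidx_top k a hk1' f1 g1, sidx_bottom k c hk1' f2 g2] at h
          constructor <;> linarith
        · rw [sidx_left k b hk1' f1 g1, sidx_right k d hk1' f2 g2] at h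
          constructor <;> linarith
        · rw [sidx_left k b hk1' f1 g1, sidx_top k c hk1' f2 g2] at h
          constructor <;> linarith
        · rw [sidx_left k b hk1' f1 g1, sidx_left k d hk1' f2 g2] at h
          constructor <;> linarith
        · rw [sidx_left k b hk1' f1 g1, sidx_bottom k c hk1' f2 g2] at h
          constructor <;> linarith
        · rw [sidx_bottom k a hk1' f1 g1, sidx_right k d hk1' f2 g2] at h
          constructor <;> linarith
        · rw [sidx_bottom k a hk1' f1 g1, sidx_top k c hk1' f2 g2] at h
          constructor <;> linarith
        · rw [sidx_bottom k a hk1' f1 g1, sidx_left k d hk1' f2 g2] at h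
          constructor <;> linarith
        · rw [sidx_bottom k a hk1' f1 g1, sidx_bottom k c hk1' f2 g2] at h
          constructor <;> linarith
      · exfalso
        have hm : (2 * ringK c d + 1) ^ 2 ≤ (2 * ringK a b - 1) ^ 2 :=
          sq_mono _ _ (by omega) (by omega)
        linarith [r2.2, r1.1]

lemma mem_update (rooms : Std.HashSet (Int × Int)) (x y i : Int)
    (hmem : ∀ p : Int × Int, p ∈ rooms ↔ sidx p.1 p.2 ≤ i - 1) (hxy : sidx x y = i) :
    ∀ p : Int × Int, p ∈ rooms.insert (x, y) ↔ sidx p.1 p.2 ≤ i := by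
  intro p
  have hmi : p ∈ rooms.insert (x, y) ↔ (x, y) = p ∨ p ∈ rooms := by
    rw [Std.HashSet.mem_insert]; simp
  rw [hmi, hmem p]
  constructor
  · rintro (h | h)
    · subst h; exact le_of_eq hxy
    · linarith
  · intro h
    by_cases h' : sidx p.1 p.2 ≤ i - 1
    · exact Or.inr h'
    · left
      have heq : sidx p.1 p.2 = sidx x y := by linarith
      obtain ⟨hA, hB⟩ := sidx_inj p.1 p.2 x y heq
      exact (Prod.ext hA hB).symm

lemma findRing_eq_aux (n k : Int) (hk : 1 ≤ k) (hlo : (2 * k - 1) ^ 2 < n) (hhi : n ≤ (2 * k + 1) ^ 2) :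
    ∀ (m fuel : Nat), m ≤ fuel → ∀ (j : Int), 1 ≤ j → j ≤ k → k - j = m → findRing fuel n j = k := by
  intro m
  induction m with
  | zero =>
    intro fuel _ j h1 h2 h3
    have hj : j = k := by omega
    subst hj
    cases fuel with
    | zero => rfl
    | succ f =>
      simp only [findRing]
      rw [if_neg (not_lt.mpr hhi)]
  | succ m ih =>
    intro fuel hf j h1 h2 h3
    have hjk : j < k := by omega
    have hmono : (2 * j + 1) ^ 2 ≤ (2 * k - 1) ^ 2 := sq_mono _ _ (by omega) (by omega)
    cases fuel with
    | zero => exact absurd hf (by omega)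
    | succ f =>
      simp only [findRing]
      rw [if_pos (lt_of_le_of_lt hmono hlo)]
      exact ih f (by omega) (j + 1) (by omega) (by omega) (by omega)

lemma emod_in (x k : Int) (_hk : 1 ≤ k) (h1 : 1 ≤ x) (h2 : x ≤ 2 * k) :
    x % (2 * k) = if x = 2 * k then 0 else x := by
  split_ifs with h
  · rw [h]; exact Int.emod_self
  · exact Int.emod_eq_of_lt (by omega) (by omega)

lemma dist_eq (a b n : Int) (hs : sidx a b = n) (hn : 2 ≤ n) : |a| + |b| = part1_alt n := by
  have hkpos : 1 ≤ ringK a b := by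
    by_contra hcon
    have h0 : ringK a b = 0 := by have := ringK_nonneg a b; omega
    rw [sidx_of_ringK_zero a b h0] at hs; omega
  obtain ⟨k, hk1, hkk, hcases⟩ := shape a b hkpos
  have hrange := sidx_range' a b k hk1 hkk
  have hlink : (2 * k + 1) ^ 2 = (2 * k - 1) ^ 2 + 8 * k := by ring
  have hkn : k ≤ n := by nlinarith [hrange.1]
  have hfr : findRing n.toNat n 1 = k :=
    findRing_eq_aux n k hk1 (by linarith [hrange.1]) (by linarith [hrange.2])
      (k - 1).toNat n.toNat (by omega) 1 (by omega) (by omega) (by omega)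
  unfold part1_alt
  rw [if_neg (by omega)]
  simp only [hfr]
  rw [PySem.Int.mod_eq_emod_of_pos (by omega : (0 : Int) < 2 * k)]
  have hk0 : (0 : Int) ≤ k := by omega
  have hzk : (0 : Int) - k = -k := by ring
  rcases hcases with ⟨h1, h2, h3⟩ | ⟨h1, h2, h3⟩ | ⟨h1, h2, h3⟩ | ⟨h1, h2, h3⟩
  · -- right side: a = k
    rw [h1] at hs ⊢
    have hv := sidx_right k b hk1 h2 h3
    have hx : n - (2 * k - 1) ^ 2 = k + b := by rw [hv] at hs; linarith
    rw [hx, emod_in (k + b) k hk1 (by omega) (by omega)]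
    split_ifs with h
    · rw [show b = k from by omega]
      simp only [hzk, abs_neg, abs_of_nonneg hk0]
    · rw [show k + b - k = b from by ring, abs_of_nonneg hk0]
  · -- top side: b = k
    rw [h1] at hs ⊢
    have hv := sidx_top k a hk1 h2 h3
    have hx : n - (2 * k - 1) ^ 2 = (k - a) + 2 * k * 1 := by rw [hv] at hs; linarith
    rw [hx, Int.add_mul_emod_self_left, emod_in (k - a) k hk1 (by omega) (by omega)]
    split_ifs with h
    · rw [show a = -k from by omega]
      simp only [hzk, abs_neg, abs_of_nonneg hk0]
    · rw [show k - a - k = -a from by ring, abs_neg, abs_of_nonneg hk0]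
      linarith
  · -- left side: a = -k
    rw [h1] at hs ⊢
    have hv := sidx_left k b hk1 h2 h3
    have hx : n - (2 * k - 1) ^ 2 = (k - b) + 2 * k * 2 := by rw [hv] at hs; linarith
    rw [hx, Int.add_mul_emod_self_left, emod_in (k - b) k hk1 (by omega) (by omega)]
    split_ifs with h
    · rw [show b = -k from by omega]
      simp only [hzk, abs_neg, abs_of_nonneg hk0]
    · rw [show k - b - k = -b from by ring, abs_neg, abs_neg, abs_of_nonneg hk0]
  · -- bottom side: b = -k
    rw [h1] at hs ⊢
    have hv := sidx_bottom k a hk1 h2 h3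
    have hx : n - (2 * k - 1) ^ 2 = (k + a) + 2 * k * 3 := by rw [hv] at hs; linarith
    rw [hx, Int.add_mul_emod_self_left, emod_in (k + a) k hk1 (by omega) (by omega)]
    split_ifs with h
    · rw [show a = k from by omega]
      simp only [hzk, abs_neg, abs_of_nonneg hk0]
    · rw [show k + a - k = a from by ring]
      simp only [abs_neg, abs_of_nonneg hk0]
      linarith
lemma spiral_step (x y : Int) (hk : 1 ≤ ringK x y) :
    (0 ≤ arr x y ∧ arr x y < 4) ∧
    ((sidx (x + (dval ((arr x y + 1) % 4)).1) (y + (dval ((arr x y + 1) % 4)).2) ≤ sidx x y ∧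
        sidx (x + (dval (arr x y)).1) (y + (dval (arr x y)).2) = sidx x y + 1 ∧
        1 ≤ ringK (x + (dval (arr x y)).1) (y + (dval (arr x y)).2) ∧
        arr (x + (dval (arr x y)).1) (y + (dval (arr x y)).2) = arr x y) ∨
      (sidx x y < sidx (x + (dval ((arr x y + 1) % 4)).1) (y + (dval ((arr x y + 1) % 4)).2) ∧
        sidx (x + (dval ((arr x y + 1) % 4)).1) (y + (dval ((arr x y + 1) % 4)).2) = sidx x y + 1 ∧
        1 ≤ ringK (x + (dval ((arr x y + 1) % 4)).1) (y + (dval ((arr x y + 1) % 4)).2) ∧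
        arr (x + (dval ((arr x y + 1) % 4)).1) (y + (dval ((arr x y + 1) % 4)).2) = (arr x y + 1) % 4)) := by
  obtain ⟨k, hk1, hkk, hc⟩ := shape x y hk
  have hD0 : dval 0 = ((1 : Int), (0 : Int)) := by decide
  have hD1 : dval 1 = ((0 : Int), (1 : Int)) := by decide
  have hD2 : dval 2 = ((-1 : Int), (0 : Int)) := by decide
  have hD3 : dval 3 = ((0 : Int), (-1 : Int)) := by decide
  have hE1 : dval ((0 + 1) % 4) = ((0 : Int), (1 : Int)) := by decide
  have hE2 : dval ((1 + 1) % 4) = ((-1 : Int), (0 : Int)) := by decide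
  have hE3 : dval ((2 + 1) % 4) = ((0 : Int), (-1 : Int)) := by decide
  have hE4 : dval ((3 + 1) % 4) = ((1 : Int), (0 : Int)) := by decide
  have hL1 : (2 * k - 1) ^ 2 = (2 * (k - 1) - 1) ^ 2 + 8 * (k - 1) := by ring
  have hL2 : (2 * (k + 1) - 1) ^ 2 = (2 * k - 1) ^ 2 + 8 * k := by ring
  rcases hc with ⟨hX, h1, h2⟩ | ⟨hY, h1, h2⟩ | ⟨hX, h1, h2⟩ | ⟨hY, h1, h2⟩
  · -- RIGHT side: x = k
    rw [hX]
    by_cases hE : y = 1 - k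
    · -- ring-entry cell (k, 1-k): turn
      rw [hE]
      have hv : arr k (1 - k) = 0 := arr_entry k (1 - k) hk1 rfl
      rw [hv]
      refine ⟨by norm_num, ?_⟩
      simp only [hE1, hD0, add_zero]
      have F1 := sidx_right k (1 - k) hk1 (by omega) (by omega)
      have F2 := sidx_right k (1 - k + 1) hk1 (by omega) (by omega)
      refine Or.inr ⟨by linarith, by linarith, ?_, ?_⟩
      · rw [ringK_right k (1 - k + 1) (by omega) (by omega) (by omega)]; omega
      · rw [arr_right k (1 - k + 1) hk1 (by omega) (by omega)]; norm_num
    · by_cases hC : y = k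
      · -- top-right corner (k, k): turn
        rw [hC]
        have hv : arr k k = 1 := arr_right k k hk1 (by omega) (by omega)
        rw [hv]
        refine ⟨by norm_num, ?_⟩
        simp only [hE2, hD1, add_zero, ← sub_eq_add_neg]
        have F1 := sidx_right k k hk1 (by omega) (by omega)
        have F2 := sidx_top k (k - 1) hk1 (by omega) (by omega)
        refine Or.inr ⟨by linarith, by linarith, ?_, ?_⟩
        · rw [ringK_top k (k - 1) (by omega) (by omega) (by omega)]; omega
        · rw [arr_top k (k - 1) hk1 (by omega) (by omega)]; norm_num
      · -- middle of right side (k ≥ 2): straight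
        have hk2 : 2 ≤ k := by omega
        have hv : arr k y = 1 := arr_right k y hk1 (by omega) h2
        rw [hv]
        refine ⟨by norm_num, ?_⟩
        simp only [hE2, hD1, add_zero, ← sub_eq_add_neg]
        have F1 := sidx_right k y hk1 (by omega) (by omega)
        have F2 := sidx_right (k - 1) y (by omega) (by omega) (by omega)
        have F3 := sidx_right k (y + 1) hk1 (by omega) (by omega)
        refine Or.inl ⟨by linarith, by linarith, ?_, ?_⟩
        · rw [ringK_right k (y + 1) (by omega) (by omega) (by omega)]; omega
        · rw [arr_right k (y + 1) hk1 (by omega) (by omega)]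
  · -- TOP side: y = k
    rw [hY]
    by_cases hC : x = -k
    · -- top-left corner (-k, k): turn
      rw [hC]
      have hv : arr (-k) k = 2 := arr_top k (-k) hk1 (by omega) (by omega)
      rw [hv]
      refine ⟨by norm_num, ?_⟩
      simp only [hE3, hD2, add_zero, ← sub_eq_add_neg]
      have F1 := sidx_top k (-k) hk1 (by omega) (by omega)
      have F2 := sidx_left k (k - 1) hk1 (by omega) (by omega)
      refine Or.inr ⟨by linarith, by linarith, ?_, ?_⟩
      · rw [ringK_left k (k - 1) (by omega) (by omega) (by omega)]; omega
      · rw [arr_left k (k - 1) hk1 (by omega) (by omega)]; norm_num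
    · -- middle of top side: straight
      have hv : arr x k = 2 := arr_top k x hk1 h1 h2
      rw [hv]
      refine ⟨by norm_num, ?_⟩
      simp only [hE3, hD2, add_zero, ← sub_eq_add_neg]
      have F1 := sidx_top k x hk1 h1 h2
      have F3 := sidx_top k (x - 1) hk1 (by omega) (by omega)
      refine Or.inl ⟨?_, by linarith, ?_, ?_⟩
      · by_cases hk2 : k = 1
        · have h00 : sidx x (k - 1) = 1 := by
            rw [show x = 0 from by omega, show k = 1 from hk2]; decide
          linarith [sq_nonneg (2 * k - 1)]
        · by_cases hxc : x = k - 1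
          · rw [hxc]
            have F1' := sidx_top k (k - 1) hk1 (by omega) (by omega)
            have F2 := sidx_right (k - 1) (k - 1) (by omega) (by omega) (by omega)
            linarith
          · have F2 := sidx_top (k - 1) x (by omega) (by omega) (by omega)
            linarith
      · rw [ringK_top k (x - 1) (by omega) (by omega) (by omega)]; omega
      · rw [arr_top k (x - 1) hk1 (by omega) (by omega)]
  · -- LEFT side: x = -k
    rw [hX]
    by_cases hC : y = -k
    · -- bottom-left corner (-k, -k): turn
      rw [hC]
      have hv : arr (-k) (-k) = 3 := arr_left k (-k) hk1 (by omega) (by omega)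
      rw [hv]
      refine ⟨by norm_num, ?_⟩
      simp only [hE4, hD3, add_zero, ← sub_eq_add_neg]
      have F1 := sidx_left k (-k) hk1 (by omega) (by omega)
      have F2 := sidx_bottom k (-k + 1) hk1 (by omega) (by omega)
      refine Or.inr ⟨by linarith, by linarith, ?_, ?_⟩
      · rw [ringK_bottom k (-k + 1) (by omega) (by omega) (by omega)]; omega
      · rw [arr_bottom k (-k + 1) hk1 (by omega) (by omega)]; norm_num
    · -- middle of left side: straight
      have hv : arr (-k) y = 3 := arr_left k y hk1 h1 h2
      rw [hv]
      refine ⟨by norm_num, ?_⟩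
      simp only [hE4, hD3, add_zero, ← sub_eq_add_neg]
      have F1 := sidx_left k y hk1 h1 h2
      have F3 := sidx_left k (y - 1) hk1 (by omega) (by omega)
      refine Or.inl ⟨?_, by linarith, ?_, ?_⟩
      · by_cases hk2 : k = 1
        · have h00 : sidx (-k + 1) y = 1 := by
            rw [show y = 0 from by omega, show k = 1 from hk2]; decide
          linarith [sq_nonneg (2 * k - 1)]
        · rw [show (-k + 1 : Int) = -(k - 1) from by ring]
          by_cases hyc : y = k - 1
          · have hq : sidx (-(k - 1)) y = (2 * (k - 1) - 1) ^ 2 + 4 * (k - 1) := by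
              rw [hyc]
              linarith [sidx_top (k - 1) (-(k - 1)) (by omega) (by omega) (by omega)]
            linarith
          · have FQ := sidx_left (k - 1) y (by omega) (by omega) (by omega)
            linarith
      · rw [ringK_left k (y - 1) (by omega) (by omega) (by omega)]; omega
      · rw [arr_left k (y - 1) hk1 (by omega) (by omega)]
  · -- BOTTOM side: y = -k
    rw [hY]
    by_cases hC : x = k
    · -- bottom-right corner (k, -k): straight into the next ring
      rw [hC]
      have hv : arr k (-k) = 0 := arr_bottom k k hk1 (by omega) (by omega)
      rw [hv]
      refine ⟨by norm_num, ?_⟩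
      simp only [hE1, hD0, add_zero]
      have F1 := sidx_bottom k k hk1 (by omega) (by omega)
      have FQ := sidx_right k (-k + 1) hk1 (by omega) (by omega)
      have F3 := sidx_right (k + 1) (-k) (by omega) (by omega) (by omega)
      refine Or.inl ⟨by linarith, by linarith, ?_, ?_⟩
      · rw [ringK_right (k + 1) (-k) (by omega) (by omega) (by omega)]; omega
      · rw [arr_entry (k + 1) (-k) (by omega) (by omega)]
    · -- middle of bottom side: straight
      have hv : arr x (-k) = 0 := arr_bottom k x hk1 h1 (by omega)
      rw [hv]
      refine ⟨by norm_num, ?_⟩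
      simp only [hE1, hD0, add_zero]
      have F1 := sidx_bottom k x hk1 h1 (by omega)
      have F3 := sidx_bottom k (x + 1) hk1 (by omega) (by omega)
      refine Or.inl ⟨?_, by linarith, ?_, ?_⟩
      · by_cases hk2 : k = 1
        · have h00 : sidx x (-k + 1) = 1 := by
            rw [show x = 0 from by omega, show k = 1 from hk2]; decide
          linarith [sq_nonneg (2 * k - 1)]
        · rw [show (-k + 1 : Int) = -(k - 1) from by ring]
          by_cases hxc : x = 1 - k
          · have hq : sidx x (-(k - 1)) = (2 * (k - 1) - 1) ^ 2 + 6 * (k - 1) := by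
              rw [hxc, show (1 - k : Int) = -(k - 1) from by ring]
              linarith [sidx_left (k - 1) (-(k - 1)) (by omega) (by omega) (by omega)]
            linarith
          · have FQ := sidx_bottom (k - 1) x (by omega) (by omega) (by omega)
            linarith
      · rw [ringK_bottom k (x + 1) (by omega) (by omega) (by omega)]; omega
      · rw [arr_bottom k (x + 1) hk1 (by omega) (by omega)]

lemma pyGet_dirs (d : Int) :
    (PySem.List.pyGet? pvDirections (PySem.Int.mod d 4)).getD (0, 0) = dval (PySem.Int.mod d 4) := by
  have h0 : 0 ≤ PySem.Int.mod d 4 := PySem.Int.mod_nonneg d (by norm_num)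
  have h4 : PySem.Int.mod d 4 < 4 := PySem.Int.mod_lt d (by norm_num)
  set r := PySem.Int.mod d 4 with hr
  have hcase : r = 0 ∨ r = 1 ∨ r = 2 ∨ r = 3 := by omega
  rcases hcase with h | h | h | h <;> rw [h] <;> decide

lemma go_inv (m : Nat) : ∀ (ll i x y d : Int) (dir nd : Int × Int) (rooms : Std.HashSet (Int × Int)),
    2 ≤ i → ll = i + m →
    (∀ p : Int × Int, p ∈ rooms ↔ sidx p.1 p.2 ≤ i - 1) →
    sidx x y = i → 1 ≤ ringK x y →
    0 ≤ d → PySem.Int.mod d 4 = arr x y →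
    dir = dval (PySem.Int.mod d 4) → nd = dval (PySem.Int.mod (d + 1) 4) →
    part1Go ll (PySem.List.pyRange i (ll + 1) 1) rooms x y d dir nd = part1_alt ll := by
  induction m with
  | zero =>
    intro ll i x y d dir nd rooms hi hll hmem hsx hrk hd0 hd hdir hnd
    have hlli : ll = i := by omega
    subst hlli
    rw [show PySem.List.pyRange ll (ll + 1) 1 = [ll] from PySem.List.pyRange_one_singleton ll]
    simp only [part1Go]
    rw [if_true]
    exact dist_eq x y ll hsx (by omega)
  | succ n ih =>
    intro ll i x y d dir nd rooms hi hll hmem hsx hrk hd0 hd hdir hnd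
    have hilt : i < ll := by omega
    rw [PySem.List.pyRange_one_cons (by omega : i < ll + 1)]
    simp only [part1Go]
    rw [if_neg (by omega : ¬ ll = i)]
    have hmod4 : PySem.Int.mod d 4 = d % 4 := PySem.Int.mod_eq_emod_of_pos (by norm_num)
    have hmod4' : PySem.Int.mod (d + 1) 4 = (d + 1) % 4 := PySem.Int.mod_eq_emod_of_pos (by norm_num)
    have hdm : d % 4 = arr x y := by rw [← hmod4]; exact hd
    obtain ⟨⟨hv0, hv4⟩, hstep⟩ := spiral_step x y hrk
    have hnd' : nd = dval ((arr x y + 1) % 4) := by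
      rw [hnd, hmod4']
      congr 1
      omega
    have hdir' : dir = dval (arr x y) := by rw [hdir, hmod4, hdm]
    have hmem' := mem_update rooms x y i hmem hsx
    rcases hstep with ⟨hle, hs1, hk1, ha1⟩ | ⟨hgt, hs1, hk1, ha1⟩
    · -- straight: the left-hand neighbour is already visited
      rw [if_neg (by
        rw [hnd']
        exact not_not_intro ((hmem' _).mpr (by rw [← hsx]; exact hle)))]
      rw [hdir']
      refine ih ll (i + 1) _ _ d _ _ _ (by omega) (by omega)
        (by intro p; rw [show (i : Int) + 1 - 1 = i from by ring]; exact hmem' p)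
        (by rw [hsx] at hs1; exact hs1)
        hk1
        hd0
        (by rw [ha1]; exact hd)
        (by rw [hmod4, hdm])
        hnd
    · -- turn: the left-hand neighbour is new
      rw [if_pos (by
        rw [hnd']
        intro hmem_q
        have hq := (hmem' _).mp hmem_q
        rw [← hsx] at hq
        linarith)]
      rw [pyGet_dirs (d + 1)]
      have harr1 : PySem.Int.mod (d + 1) 4 = (arr x y + 1) % 4 := by rw [hmod4']; omega
      rw [harr1]
      refine ih ll (i + 1) _ _ (d + 1) _ _ _ (by omega) (by omega)
        (by intro p; rw [show (i : Int) + 1 - 1 = i from by ring]; exact hmem' p)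
        (by rw [hsx] at hs1; exact hs1)
        hk1
        (by omega)
        (by rw [ha1, ← harr1])
        (by rw [harr1])
        (pyGet_dirs (d + 1 + 1))

-- ===== VERDICT (by name: the statement is the Claim_ definition above) =====
theorem part1_spec : Claim_equal_part1 := by
  unfold Claim_equal_part1 Spec_part1
  intro ll _
  by_cases h2 : ll < 2
  · unfold part1 part1_alt
    rw [PySem.List.pyRange_one_eq_nil (by omega : ll + 1 ≤ 2)]
    simp only [part1Go]
    rw [if_pos h2]
  · unfold part1
    have hini : ∀ p : Int × Int, p ∈ Std.HashSet.ofList [((0 : Int), (0 : Int))] ↔ sidx p.1 p.2 ≤ 2 - 1 := by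
      intro p
      have hof : p ∈ Std.HashSet.ofList [((0 : Int), (0 : Int))] ↔ p = ((0 : Int), (0 : Int)) := by
        constructor
        · intro h; simp at h; exact h.symm
        · intro h; simp; exact h.symm
      rw [hof]
      constructor
      · intro h; subst h; decide
      · intro h
        have hp1 := sidx_pos p.1 p.2
        obtain ⟨ha, hb⟩ := sidx_eq_one p.1 p.2 (by omega)
        exact Prod.ext ha hb
    exact go_inv (ll - 2).toNat ll 2 1 0 0 _ _ _ (by omega) (by omega) hini (by decide) (by decide)
      (by omega) (by decide) (by decide) (by decide)
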